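-- pv_equiv track=rewrite | github.com/kikuwa/finRiskTool | 05-advanced_data_mixing_web/core/sorter.py | _folded_sort
-- ===== SOURCE A (Python) =====
-- def _folded_sort(sorted_data, num_folds):
--     """
--     Implements a Cyclic Curriculum: Splitting sorted data into K buckets,
--     and then concatenating them.
--     Wait, if data is already sorted [0, 1, ..., 100], splitting into K buckets
--     [0..33], [34..66], [67..100] and concatenating gives [0..100], which is just sorted.
--
--     Folded Ordering usually implies we want to mix difficulties but maintain a structure.
--
--     Interpretation 1 (Cyclic): We want [Easy, Hard, Easy, Hard].
--     So we take [Easy1, Easy2, ...], [Hard1, Hard2, ...]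
--     This is not what sorted list gives.
--
--     Let's implement "Interleaved Folded":
--     Split sorted data into K chunks.
--     Take 1st from Chunk1, 1st from Chunk2, ..., 1st from ChunkK.
--     2nd from Chunk1, 2nd from Chunk2, ...
--
--     Example: [0, 1, 2, 3, 4, 5], K=2
--     Chunk1: [0, 1, 2], Chunk2: [3, 4, 5]
--     Result: [0, 3, 1, 4, 2, 5]
--     This mixes easy and hard uniformly, but maintaining local structure.
--
--     Interpretation 2 (Multi-stage Curriculum / Cyclic):
--     User said "Multi-stage curriculum loops".
--     This implies we want to TRAIN on Easy->Hard, then Easy->Hard again.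
--     BUT, we are just outputting a static dataset file.
--     If the trainer reads linearly, then [0..33, 34..66, 67..100] is just one big Easy->Hard.
--
--     To achieve "Loops" in a static file, we need to DUPLICATE data or PARTITION data.
--     If we just reorder:
--     We distribute the data into K "epochs" within the dataset.
--     Epoch 1 gets 1/K of the easiest, 1/K of medium, 1/K of hard?
--     No, that's just random/uniform.
--
--     Let's try: Divide data into K partitions randomly? No, that breaks ordering.
--
--     Correct interpretation of "Multi-stage Curriculum" in a static file:
--     The dataset is organized such that the model sees a full curriculum (Easy->Hard) multiple times.
--     But we only have N samples.
--     So we split N samples into K groups.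
--     Group 1: A subset of data, sorted Easy->Hard.
--     Group 2: Another subset, sorted Easy->Hard.
--     ...
--
--     Algorithm:
--     1. Sort all data by difficulty: [d1, d2, ..., dN] (d1=easiest)
--     2. Distribute these into K buckets in a Round-Robin fashion to ensure balanced difficulty distribution across buckets?
--        No, if we RR, then Bucket 1 has [d1, d(1+K), ...], Bucket 2 has [d2, d(2+K), ...]
--        All buckets have similar difficulty distributions (Full spectrum).
--     3. Sort EACH bucket Easy->Hard.
--     4. Concatenate Buckets.
--
--     Result: Easy->Hard (subset 1) -> Easy->Hard (subset 2) -> ...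
--     This creates K "waves" of curriculum.
--     """
--     if num_folds < 1:
--         num_folds = 1
--
--     # Distribute into K buckets
--     buckets = [[] for _ in range(num_folds)]
--     for i, item in enumerate(sorted_data):
--         buckets[i % num_folds].append(item)
--
--     # Buckets are already sorted because source was sorted and we distributed RR?
--     # Example: 0, 1, 2, 3. K=2.
--     # B1: 0, 2. B2: 1, 3.
--     # Both are sorted.
--
--     # Concatenate buckets
--     result = []
--     for bucket in buckets:
--         result.extend(bucket)
--
--     return result
-- ===== SOURCE B (Python) =====
-- def _folded_sort(sorted_data, num_folds):
--     k = max(num_folds, 1)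
--     return [x for j in range(k) for x in sorted_data[j::k]]
-- ===== Notes on version B (the rewrite author's own statement) =====
-- stated objective: idiomatic
-- what changed: Replaces the bucket-list round-robin distribution and concatenation with direct strided slices sorted_data[j::k] for each fold, eliminating the intermediate bucket structure.
import Mathlib
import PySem

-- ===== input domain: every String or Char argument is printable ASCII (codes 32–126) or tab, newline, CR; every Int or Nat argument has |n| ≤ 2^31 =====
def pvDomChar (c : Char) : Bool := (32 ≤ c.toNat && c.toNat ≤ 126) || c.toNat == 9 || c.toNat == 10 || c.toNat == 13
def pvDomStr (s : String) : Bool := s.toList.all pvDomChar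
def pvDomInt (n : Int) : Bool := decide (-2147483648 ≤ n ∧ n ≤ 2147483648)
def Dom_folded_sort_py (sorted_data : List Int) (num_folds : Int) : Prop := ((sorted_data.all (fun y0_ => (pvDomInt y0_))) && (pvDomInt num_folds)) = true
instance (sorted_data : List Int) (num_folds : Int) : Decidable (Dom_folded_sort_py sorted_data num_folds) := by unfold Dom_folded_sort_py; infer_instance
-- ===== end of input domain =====

-- B replaces the round-robin bucket distribution + concatenation with direct strided
-- slices sorted_data[j::k] per fold (idiomatic; no intermediate bucket structure).


-- ===== PORT A =====
-- literal port of A: clamp num_folds, build num_folds empty buckets, round-robin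
-- distribute by i % num_folds (always a non-negative in-range index, so
-- buckets[.] append is List.modify), then concatenate with a fold.
def folded_sort_py (sorted_data : List Int) (num_folds : Int) : List Int :=
  let nf := if num_folds < 1 then 1 else num_folds
  let buckets : List (List Int) := (PySem.List.pyRange 0 nf 1).map (fun _ => ([] : List Int))
  let buckets := (PySem.List.enumerate sorted_data 0).foldl
    (fun bs p => bs.modify (PySem.Int.mod p.1 nf).toNat (fun b => b ++ [p.2])) buckets
  buckets.foldl (fun r b => r ++ b) []

-- ===== PORT B =====
-- literal port of B: k = max(num_folds, 1); concatenation of the slices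
-- sorted_data[j::k] for j in range(k)  (slice? is never none since k ≥ 1 ≠ 0).
def folded_sort_py_alt (sorted_data : List Int) (num_folds : Int) : List Int :=
  let k := max num_folds 1
  (PySem.List.pyRange 0 k 1).flatMap (fun j =>
    (PySem.List.slice? sorted_data (some j) none k).getD [])

-- ===== PRECONDITION & SPEC =====
def Spec_folded_sort_py (sorted_data : List Int) (num_folds : Int) (out : List Int) : Prop := out = folded_sort_py_alt sorted_data num_folds
instance (sorted_data : List Int) (num_folds : Int) (out : List Int) : Decidable (Spec_folded_sort_py sorted_data num_folds out) := by unfold Spec_folded_sort_py; infer_instance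

-- ===== CLAIM (what is proved, stated in full; the proofs are below) =====
def Claim_equal_folded_sort_py : Prop := ∀ (sorted_data : List Int) (num_folds : Int), Dom_folded_sort_py sorted_data num_folds → Spec_folded_sort_py sorted_data num_folds (folded_sort_py sorted_data num_folds)

-- ===== LEMMAS AND PROOFS =====

-- number of indices i < N with i % k = j (for j < k), as a closed form
def pvC (N k j : ℕ) : ℕ := (N + k - 1 - j) / k

-- the j-th strided sublist of xs with stride k
def pvStride (xs : List Int) (k j : ℕ) : List Int :=
  (List.range (pvC xs.length k j)).map (fun t => xs.getD (j + k * t) 0)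

lemma pv_div_aux (k a b : ℕ) (hk : 0 < k) (hb : b < k) : (k * a + b) / k = a := by
  rw [Nat.mul_add_div hk, Nat.div_eq_of_lt hb, Nat.add_zero]

lemma pv_filter_range (k j : ℕ) (hk : 0 < k) (hj : j < k) (n : ℕ) :
    (List.range n).filter (fun i => decide (i % k = j)) =
      (List.range (pvC n k j)).map (fun t => j + k * t) := by
  induction n with
  | zero =>
      have : pvC 0 k j = 0 := by
        unfold pvC; exact Nat.div_eq_of_lt (by omega)
      simp [this]
  | succ n ih =>
      rw [List.range_succ, List.filter_append, ih]
      have hq := Nat.div_add_mod n k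
      set q := n / k with hq'
      set r := n % k with hr'
      have hrk : r < k := Nat.mod_lt _ hk
      have hql : k * (q + 1) = k * q + k := by ring
      by_cases h : r = j
      · have hn : n = k * q + j := by omega
        have hC : pvC n k j = q := by
          unfold pvC
          have e1 : n + k - 1 - j = k * q + (k - 1) := by omega
          rw [e1, pv_div_aux k q (k - 1) hk (by omega)]
        have hC' : pvC (n + 1) k j = q + 1 := by
          unfold pvC
          have e2 : n + 1 + k - 1 - j = k * (q + 1) := by omega
          rw [e2, Nat.mul_div_cancel_left _ hk]
        rw [hC', List.range_succ, List.map_append, hC, hn]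
        have hmod : (k * q + j) % k = j := by
          rw [Nat.mul_add_mod, Nat.mod_eq_of_lt hj]
        simp [hmod]
        omega
      · have hC : pvC (n + 1) k j = pvC n k j := by
          unfold pvC
          rcases lt_or_ge j r with hlt | hge
          · have e1 : n + k - 1 - j = k * (q + 1) + (r - 1 - j) := by omega
            have e2 : n + 1 + k - 1 - j = k * (q + 1) + (r - j) := by omega
            rw [e1, e2, pv_div_aux k (q + 1) _ hk (by omega),
              pv_div_aux k (q + 1) _ hk (by omega)]
          · have hgt : j > r := by omega
            have e1 : n + k - 1 - j = k * q + (k - 1 - (j - r)) := by omega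
            have e2 : n + 1 + k - 1 - j = k * q + (k - (j - r)) := by omega
            rw [e1, e2, pv_div_aux k q _ hk (by omega),
              pv_div_aux k q _ hk (by omega)]
        rw [hC]
        have : ¬ (n % k = j) := by omega
        simp [this]

lemma pv_fold_len (idx : ℕ → ℕ) (g : ℕ → Int) (l : List ℕ) (bs : List (List Int)) :
    (l.foldl (fun bs i => bs.modify (idx i) (fun b => b ++ [g i])) bs).length = bs.length := by
  induction l generalizing bs with
  | nil => rfl
  | cons x l ih => simp [List.foldl_cons, ih, List.length_modify]

lemma pv_fold_getD (idx : ℕ → ℕ) (g : ℕ → Int) (l : List ℕ) :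
    ∀ (bs : List (List Int)) (j : ℕ), j < bs.length →
      (∀ i ∈ l, idx i < bs.length) →
      (l.foldl (fun bs i => bs.modify (idx i) (fun b => b ++ [g i])) bs).getD j [] =
        bs.getD j [] ++ (l.filter (fun i => decide (idx i = j))).map g := by
  induction l with
  | nil => intro bs j hj _; simp
  | cons x l ih =>
      intro bs j hj hall
      rw [List.foldl_cons]
      rw [ih (bs.modify (idx x) (fun b => b ++ [g x])) j
        (by simpa [List.length_modify] using hj)
        (by intro i hi; simpa [List.length_modify] using hall i (by simp [hi]))]
      have hmod : (bs.modify (idx x) (fun b => b ++ [g x])).getD j [] =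
          if idx x = j then bs.getD j [] ++ [g x] else bs.getD j [] := by
        rw [List.getD_eq_getElem _ _ (by simpa [List.length_modify] using hj),
          List.getElem_modify, List.getD_eq_getElem _ _ hj]
      rw [hmod]
      by_cases h : idx x = j <;> simp [h]

-- A computes the concatenation of the strided sublists
lemma pv_A (xs : List Int) (nf : Int) (k : ℕ) (hk : 0 < k)
    (hnf : (if nf < 1 then 1 else nf) = (k : Int)) :
    folded_sort_py xs nf = (List.range k).flatMap (fun j => pvStride xs k j) := by
  simp only [folded_sort_py]
  rw [hnf]
  set N := xs.length with hN
  rw [PySem.List.enumerate_eq_map_pyRange xs 0]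
  have hlen : PySem.List.len xs = (N : Int) := by
    simp [PySem.List.len, hN]
  rw [hlen, PySem.List.pyRange_zero_natCast N, PySem.List.pyRange_zero_natCast k]
  rw [List.foldl_map, List.foldl_map]
  dsimp only
  simp only [PySem.Int.mod_natCast, PySem.List.pyGetD_natCast, Int.toNat_natCast]
  set bs0 : List (List Int) := List.map (fun (_ : Int) => ([] : List Int)) (List.map (fun (i : ℕ) => (i : Int)) (List.range k)) with hbs0
  have hbs0len : bs0.length = k := by rw [hbs0]; simp
  set F := (List.range N).foldl (fun bs i => bs.modify (i % k) (fun b => b ++ [xs.getD i 0])) bs0 with hF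
  have hFlen : F.length = k := by
    rw [hF, pv_fold_len (fun i => i % k) (fun i => xs.getD i 0)]; exact hbs0len
  have hFget : ∀ j, j < k → F.getD j [] = pvStride xs k j := by
    intro j hj
    rw [hF, pv_fold_getD (fun i => i % k) (fun i => xs.getD i 0) (List.range N) bs0 j
      (by rw [hbs0len]; exact hj) (by intro i _; dsimp only; rw [hbs0len]; exact Nat.mod_lt i hk)]
    have hinit : bs0.getD j [] = [] := by
      unfold List.getD
      rcases h : bs0[j]? with _ | a
      · rfl
      · have ha : a ∈ bs0 := List.mem_of_getElem? h
        rw [hbs0] at ha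
        simp at ha
        simp [ha]
    rw [hinit, List.nil_append, pv_filter_range k j hk hj N, List.map_map]
    unfold pvStride
    rw [← hN]
    rfl
  have hFeq : F = (List.range k).map (fun j => pvStride xs k j) := by
    apply List.ext_getElem
    · simp [hFlen]
    · intro j h1 h2
      have hjk : j < k := by simpa [hFlen] using h1
      have := hFget j hjk
      rw [List.getD_eq_getElem _ _ h1] at this
      rw [this]
      simp [List.getElem_range]
  rw [hFeq, PySem.List.foldl_append_eq_flatMap]
  simp [List.flatMap_map]

-- the slice sorted_data[j::k] is the j-th strided sublist
lemma pv_slice (xs : List Int) (k j : ℕ) (hk : 0 < k) (hj : j < k) :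
    (PySem.List.slice? xs (some (j : Int)) none (k : Int)).getD [] = pvStride xs k j := by
  have hk0 : ((k : Int)) ≠ 0 := by omega
  set N := xs.length with hN
  unfold PySem.List.slice? PySem.List.sliceIndices
  rw [if_neg hk0]
  have hstepneg : ¬ ((k : Int) < 0) := by omega
  simp only [hstepneg, if_false]
  by_cases hjN : j < N
  · -- start = j, in range
    have hmin : min ((j : Int)) ((N : Int)) = (j : Int) := by omega
    have hjneg : ¬ ((j : Int) < 0) := by omega
    simp only [hjneg, if_false, hmin, ← hN]
    have hlt : (j : Int) < (N : Int) := by omega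
    have hpos : (0 : Int) < (k : Int) := by omega
    simp only [hpos, if_true, hlt]
    have hcast : ((N : Int) - (j : Int) + (k : Int) - 1) = ((N - j + k - 1 : ℕ) : Int) := by omega
    have hcnt : (((N : Int) - (j : Int) + (k : Int) - 1) / (k : Int)).toNat = pvC N k j := by
      rw [hcast]
      rw [← Int.natCast_div]
      rw [Int.toNat_natCast]
      unfold pvC
      congr 1
      omega
    rw [hcnt]
    unfold pvStride
    rw [← hN]
    refine (List.filterMap_congr (g := fun t => some (xs.getD (j + k * t) 0)) ?_).trans (by simp)
    intro t ht
    have htc : t < pvC N k j := List.mem_range.mp ht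
    have hbound : j + k * t < N := by
      have h1 : k * pvC N k j ≤ N - j + k - 1 := by
        have e : N + k - 1 - j = N - j + k - 1 := by omega
        unfold pvC
        rw [e, Nat.mul_comm]
        exact Nat.div_mul_le_self _ _
      have h2 : k * t ≤ k * (pvC N k j - 1) := Nat.mul_le_mul_left k (by omega)
      have h3 : k * (pvC N k j - 1) = k * pvC N k j - k := by
        rcases Nat.eq_zero_or_pos (pvC N k j) with h | h
        · omega
        · rw [Nat.mul_sub, Nat.mul_one]
      omega
    have hidx : ((j : Int) + (k : Int) * (t : Int)) = ((j + k * t : ℕ) : Int) := by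
      push_cast; ring
    rw [hidx, Int.toNat_natCast]
    rw [List.getElem?_eq_getElem (by omega)]
    dsimp only
    rw [List.getD_eq_getElem _ _ (by omega)]
  · -- start clamps to N, slice is empty; pvC = 0
    have hmin : min ((j : Int)) ((N : Int)) = (N : Int) := by omega
    have hjneg : ¬ ((j : Int) < 0) := by omega
    simp only [hjneg, if_false, hmin, ← hN]
    have hlt : ¬ ((N : Int) < (N : Int)) := by omega
    have hpos : (0 : Int) < (k : Int) := by omega
    simp only [hpos, if_true, hlt, if_false]
    have : pvC N k j = 0 := by
      unfold pvC; exact Nat.div_eq_of_lt (by omega)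
    unfold pvStride
    rw [← hN, this]
    simp

-- B computes the concatenation of the strided sublists
lemma pv_B (xs : List Int) (nf : Int) (k : ℕ) (hk : 0 < k) (hnf : max nf 1 = (k : Int)) :
    folded_sort_py_alt xs nf = (List.range k).flatMap (fun j => pvStride xs k j) := by
  simp only [folded_sort_py_alt]
  rw [hnf, PySem.List.pyRange_zero_natCast k, List.flatMap_map]
  apply List.flatMap_congr
  intro j hj
  exact pv_slice xs k j hk (List.mem_range.mp hj)

-- ===== VERDICT (by name: the statement is the Claim_ definition above) =====
theorem folded_sort_py_spec : Claim_equal_folded_sort_py := by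
  intro xs nf _dom
  unfold Spec_folded_sort_py
  set k : ℕ := (if nf < 1 then 1 else nf).toNat with hk'
  have hk : 0 < k := by rw [hk']; split <;> omega
  have h1 : (if nf < 1 then 1 else nf) = (k : Int) := by
    rw [hk']; split <;> omega
  have h2 : max nf 1 = (k : Int) := by
    rw [← h1]; split <;> omega
  rw [pv_A xs nf k hk h1, pv_B xs nf k hk h2]
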